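-- pv_equiv track=rewrite | github.com/Feenc/sulishtml | python/guiproba.py | eltol
-- ===== SOURCE A (Python) =====
-- def eltol(pontok,x,y):
--     vissza=[]
--     for i, pont in enumerate(pontok):
--         if i%2==0:
--             vissza.append(pont+x)
--         else:
--             vissza.append(pont+y)
--     return vissza
-- ===== SOURCE B (Python) =====
-- def eltol(pontok, x, y):
--     vissza = list(pontok)
--     vissza[0::2] = [p + x for p in vissza[0::2]]
--     vissza[1::2] = [p + y for p in vissza[1::2]]
--     return vissza
-- ===== Notes on version B (the rewrite author's own statement) =====
-- stated objective: simpler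
-- what changed: Replaces the per-element parity branch inside one enumerate loop with two strided slice passes: add x to the even-index slice, then y to the odd-index slice of a copy.
import Mathlib
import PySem

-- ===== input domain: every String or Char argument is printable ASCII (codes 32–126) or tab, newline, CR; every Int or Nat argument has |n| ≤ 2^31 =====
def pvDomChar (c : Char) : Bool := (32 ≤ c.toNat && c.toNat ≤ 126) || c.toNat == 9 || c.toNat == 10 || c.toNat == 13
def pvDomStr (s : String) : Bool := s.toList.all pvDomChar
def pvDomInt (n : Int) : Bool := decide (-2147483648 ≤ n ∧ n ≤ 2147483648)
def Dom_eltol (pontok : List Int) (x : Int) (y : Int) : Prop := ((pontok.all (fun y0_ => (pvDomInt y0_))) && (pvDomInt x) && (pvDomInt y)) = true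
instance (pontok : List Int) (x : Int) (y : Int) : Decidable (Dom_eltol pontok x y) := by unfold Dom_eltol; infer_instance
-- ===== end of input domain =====

-- B replaces A's per-element parity branch with two strided slice passes (even then odd positions); simpler, return value only.

-- ===== PORT A =====
-- for i, pont in enumerate(pontok): if i%2==0: append(pont+x) else append(pont+y)
def eltol (pontok : List Int) (x : Int) (y : Int) : List Int :=
  (PySem.List.enumerate pontok 0).foldl
    (fun vissza ip =>
      if PySem.Int.mod ip.1 2 == 0 then vissza ++ [ip.2 + x] else vissza ++ [ip.2 + y])
    []

-- ===== PORT B =====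
-- xs[0::2] as a list (Python step-2 slice, ported by hand: exact on lists)
def pvEvery2 : List Int → List Int
  | [] => []
  | [a] => [a]
  | a :: _ :: rest => a :: pvEvery2 rest

-- vissza[0::2] = es  (strided slice assignment starting at position 0; exact when es has the slice's length)
def pvSetEven : List Int → List Int → List Int
  | vs, [] => vs
  | [], _ :: _ => []
  | [_], e :: _ => [e]
  | _ :: v1 :: vs, e :: es => e :: v1 :: pvSetEven vs es

-- vissza[1::2] = es  (strided slice assignment starting at position 1)
def pvSetOdd : List Int → List Int → List Int
  | [], _ => []
  | v0 :: vs, es => v0 :: pvSetEven vs es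

def eltol_alt (pontok : List Int) (x : Int) (y : Int) : List Int :=
  let vissza := pontok
  let vissza := pvSetEven vissza ((pvEvery2 vissza).map (· + x))
  let vissza := pvSetOdd vissza ((pvEvery2 vissza.tail).map (· + y))
  vissza

-- ===== PRECONDITION & SPEC =====
def Spec_eltol (pontok : List Int) (x : Int) (y : Int) (out : List Int) : Prop := out = eltol_alt pontok x y
instance (pontok : List Int) (x : Int) (y : Int) (out : List Int) : Decidable (Spec_eltol pontok x y out) := by unfold Spec_eltol; infer_instance

-- ===== CLAIM (what is proved, stated in full; the proofs are below) =====
def Claim_equal_eltol : Prop := ∀ (pontok : List Int) (x : Int) (y : Int), Dom_eltol pontok x y → Spec_eltol pontok x y (eltol pontok x y)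

-- ===== LEMMAS AND PROOFS =====

theorem loopA (x y : Int) : ∀ (xs : List Int) (s : Int) (acc : List Int),
    (PySem.List.enumerate xs s).foldl
      (fun vissza ip =>
        if PySem.Int.mod ip.1 2 == 0 then vissza ++ [ip.2 + x] else vissza ++ [ip.2 + y]) acc
    = acc ++ (PySem.List.enumerate xs s).map
        (fun ip => if PySem.Int.mod ip.1 2 == 0 then ip.2 + x else ip.2 + y) := by
  intro xs
  induction xs with
  | nil => intro s acc; simp [PySem.List.enumerate_nil]
  | cons a r ih =>
      intro s acc
      simp only [PySem.List.enumerate_cons, List.foldl_cons, List.map_cons, ih]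
      split <;> simp

theorem mod2_shift (s : Int) : PySem.Int.mod (s + 2) 2 = PySem.Int.mod s 2 := by
  have h2 : (0:Int) < 2 := by norm_num
  rw [PySem.Int.mod_eq_emod_of_pos h2, PySem.Int.mod_eq_emod_of_pos h2]
  omega

theorem shiftA (x y : Int) : ∀ (r : List Int) (s : Int),
    (PySem.List.enumerate r (s + 2)).map
      (fun ip => if PySem.Int.mod ip.1 2 == 0 then ip.2 + x else ip.2 + y)
    = (PySem.List.enumerate r s).map
      (fun ip => if PySem.Int.mod ip.1 2 == 0 then ip.2 + x else ip.2 + y) := by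
  intro r
  induction r with
  | nil => intro s; simp [PySem.List.enumerate_nil]
  | cons a t ih =>
      intro s
      simp only [PySem.List.enumerate_cons, List.map_cons, mod2_shift]
      have := ih (s + 1)
      rw [show s + 2 + 1 = s + 1 + 2 by ring, this]

theorem stepA (a b : Int) (r : List Int) (x y : Int) :
    eltol (a :: b :: r) x y = (a + x) :: (b + y) :: eltol r x y := by
  simp only [eltol, loopA]
  simp only [PySem.List.enumerate_cons, List.map_cons]
  have h0 : PySem.Int.mod (0:Int) 2 = 0 := by decide
  have h1 : PySem.Int.mod (0+1:Int) 2 = 1 := by decide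
  rw [show (0:Int) + 1 + 1 = 0 + 2 by ring, shiftA]
  rw [h0, h1]
  simp

theorem every2_cons (c : Int) (r : List Int) : pvEvery2 (c :: r) = c :: pvEvery2 r.tail := by
  cases r <;> rfl

theorem setEven_cons (v0 e : Int) (vs es : List Int) :
    pvSetEven (v0 :: vs) (e :: es) = e :: pvSetOdd vs es := by
  cases vs <;> rfl

theorem setOdd_cons (v0 : Int) (vs es : List Int) :
    pvSetOdd (v0 :: vs) es = v0 :: pvSetEven vs es := rfl

theorem stepB (a b : Int) (r : List Int) (x y : Int) :
    eltol_alt (a :: b :: r) x y = (a + x) :: (b + y) :: eltol_alt r x y := by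
  simp only [eltol_alt, every2_cons, List.tail_cons, List.map_cons, setEven_cons, setOdd_cons]

theorem mainEq (x y : Int) : (xs : List Int) → eltol xs x y = eltol_alt xs x y
  | [] => by simp [eltol, eltol_alt, PySem.List.enumerate_nil, pvEvery2, pvSetEven, pvSetOdd]
  | [a] => by
      simp [eltol, eltol_alt, PySem.List.enumerate_nil, PySem.List.enumerate_cons,
        pvEvery2, pvSetEven, pvSetOdd]
  | a :: b :: r => by rw [stepA, stepB, mainEq x y r]

-- ===== VERDICT (by name: the statement is the Claim_ definition above) =====
theorem eltol_spec : Claim_equal_eltol := by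
  intro pontok x y _
  unfold Spec_eltol
  exact mainEq x y pontok
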